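-- pv_equiv track=rewrite | github.com/ahryhoryev/Lesson | lesson-07/Solution-02.py | get_products_info
-- ===== SOURCE A (Python) =====
-- def get_products_info(data: list) -> dict:
--     result = {}
--     for row in data:
--         if row[1] in result:
--             result[row[1]]["bought_count"] += row[2]
--             result[row[1]]["total_price"] += row[3]
--         else:
--             # Otherwise set initial values
--             result[row[1]] = {
--                 "bought_count": row[2],
--                 "total_price": row[3],
--             }
--     return result
-- ===== SOURCE B (Python) =====
-- def get_products_info(data: list) -> dict:
--     # Phase 1: group each product's (count, price) pairs in first-appearance order.
--     groups = {}
--     for row in data: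
--         groups.setdefault(row[1], []).append((row[2], row[3]))
--     # Phase 2: reduce each group to its two sums.
--     return {
--         key: {
--             "bought_count": sum(c for c, _ in pairs),
--             "total_price": sum(p for _, p in pairs),
--         }
--         for key, pairs in groups.items()
--     }
-- ===== Notes on version B (the rewrite author's own statement) =====
-- stated objective: alternative
-- what changed: B replaces A's in-place running-total dict of dicts with a two-phase decomposition: one pass grouping each product's (count, price) pairs into lists keyed by first appearance, then a comprehension reducing each group with sum().
import Mathlib
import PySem

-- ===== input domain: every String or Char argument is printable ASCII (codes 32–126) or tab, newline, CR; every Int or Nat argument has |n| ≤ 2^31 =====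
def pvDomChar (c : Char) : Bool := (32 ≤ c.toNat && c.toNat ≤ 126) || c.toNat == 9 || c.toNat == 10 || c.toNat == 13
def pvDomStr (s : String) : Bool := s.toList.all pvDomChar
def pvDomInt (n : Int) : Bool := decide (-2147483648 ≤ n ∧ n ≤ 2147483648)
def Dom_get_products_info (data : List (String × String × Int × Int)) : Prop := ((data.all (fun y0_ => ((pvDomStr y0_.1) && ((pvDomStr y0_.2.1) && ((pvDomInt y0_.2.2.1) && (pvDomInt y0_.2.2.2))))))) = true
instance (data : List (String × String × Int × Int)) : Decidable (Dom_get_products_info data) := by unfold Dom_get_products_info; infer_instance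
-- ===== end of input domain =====

-- B changes A's single-pass running-total dict of inner dicts into a two-phase
-- grouping (collect each product's (count, price) pairs, then sum each group);
-- same O(n) cost, different decomposition ('alternative').

-- ===== PORT A =====
-- A: one dict `result`; per row either bump the existing inner dict's two
-- fields in place or insert a fresh inner dict. Returned as an assoc list
-- (dict of dicts → List (String × List (String × Int))).
def get_products_info (data : List (String × String × Int × Int)) : List (String × List (String × Int)) :=
  let result : PySem.Dict String (PySem.Dict String Int) :=
    data.foldl (fun result row =>
      if result.contains row.2.1 then
        -- result[row[1]]["bought_count"] += row[2]; result[row[1]]["total_price"] += row[3]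
        result.insert row.2.1
          (((result.getD row.2.1 PySem.Dict.empty).modify "bought_count" 0 (· + row.2.2.1)).modify
            "total_price" 0 (· + row.2.2.2))
      else
        result.insert row.2.1
          (PySem.Dict.ofList [("bought_count", row.2.2.1), ("total_price", row.2.2.2)]))
      PySem.Dict.empty
  result.items.map (fun p => (p.1, p.2.items))

-- ===== PORT B =====
-- B: phase 1 groups (count, price) pairs per product key (setdefault+append),
-- phase 2 maps each group to its two sums.
def get_products_info_alt (data : List (String × String × Int × Int)) : List (String × List (String × Int)) :=
  let groups : PySem.Dict String (List (Int × Int)) :=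
    data.foldl (fun g row => g.modify row.2.1 [] (· ++ [(row.2.2.1, row.2.2.2)])) PySem.Dict.empty
  groups.items.map (fun p =>
    (p.1, [("bought_count", (p.2.map Prod.fst).sum), ("total_price", (p.2.map Prod.snd).sum)]))

-- ===== PRECONDITION & SPEC =====
def Spec_get_products_info (data : List (String × String × Int × Int)) (out : List (String × List (String × Int))) : Prop := out = get_products_info_alt data
instance (data : List (String × String × Int × Int)) (out : List (String × List (String × Int))) : Decidable (Spec_get_products_info data out) := by unfold Spec_get_products_info; infer_instance

-- ===== CLAIM (what is proved, stated in full; the proofs are below) =====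
def Claim_equal_get_products_info : Prop := ∀ (data : List (String × String × Int × Int)), Dom_get_products_info data → Spec_get_products_info data (get_products_info data)

-- ===== LEMMAS AND PROOFS =====

-- the inner dict A maintains for a group of (count, price) pairs
def pvSumm (l : List (Int × Int)) : PySem.Dict String Int :=
  PySem.Dict.ofList [("bought_count", (l.map Prod.fst).sum), ("total_price", (l.map Prod.snd).sum)]

-- B's grouping dict, with every group replaced by its summed inner dict
def pvMapVals (g : PySem.Dict String (List (Int × Int))) : PySem.Dict String (PySem.Dict String Int) :=
  PySem.Dict.mk (g.items.map (fun p => (p.1, pvSumm p.2)))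

theorem pvSumm_items (l : List (Int × Int)) :
    (pvSumm l).items =
      [("bought_count", (l.map Prod.fst).sum), ("total_price", (l.map Prod.snd).sum)] := by
  rfl

theorem pvContains_mapVals (g : PySem.Dict String (List (Int × Int))) (k : String) :
    (pvMapVals g).contains k = g.contains k := by
  simp only [pvMapVals, PySem.Dict.contains, List.any_map]
  rfl

theorem pvGet?_mapVals (g : PySem.Dict String (List (Int × Int))) (k : String) :
    (pvMapVals g).get? k = (g.get? k).map pvSumm := by
  simp only [pvMapVals, PySem.Dict.get?, List.find?_map]
  have hc : ((fun (p : String × PySem.Dict String Int) => p.1 == k) ∘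
      fun (p : String × List (Int × Int)) => (p.1, pvSumm p.2)) =
      fun p => p.1 == k := rfl
  rw [hc]
  cases List.find? (fun p => p.1 == k) g.items <;> rfl

theorem pvGetD_mapVals (g : PySem.Dict String (List (Int × Int))) (k : String)
    (h : g.contains k = true) :
    (pvMapVals g).getD k PySem.Dict.empty = pvSumm (g.getD k []) := by
  have hs : (g.get? k).isSome := by
    rw [← PySem.Dict.contains_eq_isSome_get?]; exact h
  obtain ⟨l, hl⟩ := Option.isSome_iff_exists.mp hs
  rw [PySem.Dict.getD_of_get?_eq_some g [] hl,
    PySem.Dict.getD_of_get?_eq_some (pvMapVals g) PySem.Dict.empty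
      (show (pvMapVals g).get? k = some (pvSumm l) by rw [pvGet?_mapVals, hl]; rfl)]

theorem pvMapVals_insert (g : PySem.Dict String (List (Int × Int))) (k : String)
    (v : List (Int × Int)) :
    pvMapVals (g.insert k v) = (pvMapVals g).insert k (pvSumm v) := by
  by_cases h : g.contains k = true
  · rw [PySem.Dict.insert, if_pos h, PySem.Dict.insert,
      if_pos (by rw [pvContains_mapVals]; exact h)]
    simp only [pvMapVals, List.map_map]
    congr 1
    apply List.map_congr_left
    intro p _
    by_cases hp : (p.1 == k) = true <;> simp [Function.comp, hp]
  · rw [PySem.Dict.insert, if_neg h, PySem.Dict.insert,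
      if_neg (by rw [pvContains_mapVals]; exact h)]
    simp [pvMapVals]

-- A's in-place bump of the two inner fields is exactly the summed dict of the
-- group extended by the new pair
theorem pvSumm_step (l : List (Int × Int)) (c p : Int) :
    ((pvSumm l).modify "bought_count" 0 (· + c)).modify "total_price" 0 (· + p) =
      pvSumm (l ++ [(c, p)]) := by
  simp only [pvSumm, PySem.Dict.modify, PySem.Dict.ofList, PySem.Dict.update,
    PySem.Dict.insert, PySem.Dict.getD_eq_get?_getD, PySem.Dict.get?, PySem.Dict.contains,
    PySem.Dict.empty]
  simp

-- one step of A's loop on the mapped state is the mapped step of B's loop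
theorem pvStep (g : PySem.Dict String (List (Int × Int))) (row : String × String × Int × Int) :
    (if (pvMapVals g).contains row.2.1 then
        (pvMapVals g).insert row.2.1
          ((((pvMapVals g).getD row.2.1 PySem.Dict.empty).modify "bought_count" 0
              (· + row.2.2.1)).modify "total_price" 0 (· + row.2.2.2))
      else
        (pvMapVals g).insert row.2.1
          (PySem.Dict.ofList [("bought_count", row.2.2.1), ("total_price", row.2.2.2)])) =
      pvMapVals (g.modify row.2.1 [] (· ++ [(row.2.2.1, row.2.2.2)])) := by
  have hm : g.modify row.2.1 [] (· ++ [(row.2.2.1, row.2.2.2)]) =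
      g.insert row.2.1 (g.getD row.2.1 [] ++ [(row.2.2.1, row.2.2.2)]) := rfl
  rw [pvContains_mapVals, hm, pvMapVals_insert]
  by_cases h : g.contains row.2.1 = true
  · rw [if_pos h, pvGetD_mapVals g _ h, pvSumm_step]
  · rw [if_neg h, PySem.Dict.getD_of_not_contains g [] (by simpa using h)]
    congr 1
    simp [pvSumm]

theorem pvInv (data : List (String × String × Int × Int)) (g : PySem.Dict String (List (Int × Int))) :
    data.foldl (fun result row =>
      if result.contains row.2.1 then
        result.insert row.2.1
          (((result.getD row.2.1 PySem.Dict.empty).modify "bought_count" 0 (· + row.2.2.1)).modify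
            "total_price" 0 (· + row.2.2.2))
      else
        result.insert row.2.1
          (PySem.Dict.ofList [("bought_count", row.2.2.1), ("total_price", row.2.2.2)]))
      (pvMapVals g) =
    pvMapVals (data.foldl (fun g row => g.modify row.2.1 [] (· ++ [(row.2.2.1, row.2.2.2)])) g) := by
  induction data generalizing g with
  | nil => rfl
  | cons row rest ih =>
    simp only [List.foldl_cons]
    rw [pvStep, ih]

-- ===== VERDICT (by name: the statement is the Claim_ definition above) =====
theorem get_products_info_spec : Claim_equal_get_products_info := by
  intro data _
  show get_products_info data = get_products_info_alt data
  unfold get_products_info get_products_info_alt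
  have h0 : (PySem.Dict.empty : PySem.Dict String (PySem.Dict String Int)) =
      pvMapVals PySem.Dict.empty := rfl
  rw [h0, pvInv]
  simp only [pvMapVals, List.map_map]
  apply List.map_congr_left
  intro p _
  simp [pvSumm_items, Function.comp]
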